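-- pv_equiv track=rewrite | github.com/RibEvgeniya/python | lab_1.py | func_10
-- ===== SOURCE A (Python) =====
-- def func_10(x,n):
--     s=[]
--     for i in range (0, n):
--         s.append((x[i].split()).copy())
--     s.sort(key=len)
--     for i in range(0, n):
--         s[i]=" ".join(s[i])
--     return(s)
-- ===== SOURCE B (Python) =====
-- def func_10(x, n):
--     buckets = {}
--     for i in range(0, n):
--         words = x[i].split()
--         buckets.setdefault(len(words), []).append(" ".join(words))
--     out = []
--     for c in sorted(buckets):
--         out += buckets[c]
--     return out
-- ===== Notes on version B (the rewrite author's own statement) =====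
-- stated objective: alternative
-- what changed: Replaces the comparison sort by word count with a single-pass bucket grouping into a dict keyed by word count, then emits the buckets in ascending key order (stability from insertion order); also joins each line once as it is read instead of a second indexed pass.
import Mathlib
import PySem

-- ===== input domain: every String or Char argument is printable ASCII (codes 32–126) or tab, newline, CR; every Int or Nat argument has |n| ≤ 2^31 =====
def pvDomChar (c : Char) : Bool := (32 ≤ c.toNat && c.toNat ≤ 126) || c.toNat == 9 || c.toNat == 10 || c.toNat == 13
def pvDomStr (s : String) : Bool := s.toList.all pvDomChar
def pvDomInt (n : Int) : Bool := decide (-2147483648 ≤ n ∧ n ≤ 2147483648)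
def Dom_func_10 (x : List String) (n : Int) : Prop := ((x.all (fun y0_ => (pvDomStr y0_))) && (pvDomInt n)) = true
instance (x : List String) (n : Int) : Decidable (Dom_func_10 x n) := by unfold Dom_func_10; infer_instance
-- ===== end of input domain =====

-- B groups the normalized lines into a dict keyed by word count (one pass) and emits the
-- buckets in ascending key order, instead of A's comparison sort keyed by len; same output.

-- ===== PORT A =====
-- Python's second loop rewrites s[i] in place with a value of a different type (list -> str);
-- under the Lean type convention this is ported as building the output list in the same index
-- order, reading each slot once before it would be overwritten — exact on every admitted input.
def func_10 (x : List String) (n : Int) : List String :=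
  let s1 : List (List String) :=
    (PySem.List.pyRange 0 n).foldl
      (fun acc i => acc ++ [PySem.Str.split₀ (PySem.List.pyGetD x i "")]) []
  let s2 := PySem.List.sorted s1 (fun ws => ws.length) false
  (PySem.List.pyRange 0 n).foldl
    (fun acc i => acc ++ [PySem.Str.join " " (PySem.List.pyGetD s2 i [])]) []

-- ===== PORT B =====
def func_10_alt (x : List String) (n : Int) : List String :=
  let buckets : PySem.Dict Int (List String) :=
    (PySem.List.pyRange 0 n).foldl
      (fun d i =>
        let ws := PySem.Str.split₀ (PySem.List.pyGetD x i "")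
        d.modify ((ws.length : Int)) [] (fun l => l ++ [PySem.Str.join " " ws]))
      PySem.Dict.empty
  (PySem.List.sorted buckets.keys (fun c => c) false).foldl
    (fun out c => out ++ buckets.getD c []) []

-- ===== PRECONDITION & SPEC =====
-- A raises IndexError (x[i]) when n exceeds len(x); exactly those inputs are excluded.
def Pre_func_10 (x : List String) (n : Int) : Prop := n ≤ (x.length : Int)
instance (x : List String) (n : Int) : Decidable (Pre_func_10 x n) := by unfold Pre_func_10; infer_instance
def pvWitness_func_10 : List String × Int := (["b  c", "", "a"], 3)

def Spec_func_10 (x : List String) (n : Int) (out : List String) : Prop := out = func_10_alt x n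
instance (x : List String) (n : Int) (out : List String) : Decidable (Spec_func_10 x n out) := by unfold Spec_func_10; infer_instance

-- ===== CLAIM (what is proved, stated in full; the proofs are below) =====
def Claim_equal_func_10 : Prop := ∀ (x : List String) (n : Int), Dom_func_10 x n → Pre_func_10 x n → Spec_func_10 x n (func_10 x n)

-- ===== LEMMAS AND PROOFS =====

-- insertBy passes over a block it does not go before
lemma insertBy_append_of_not_before {α : Type} (before : α → α → Bool) (x : α)
    (as bs : List α) (h : ∀ a ∈ as, before x a = false) :
    PySem.List.insertBy before x (as ++ bs) = as ++ PySem.List.insertBy before x bs := by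
  induction as with
  | nil => simp
  | cons a as ih =>
      simp only [List.cons_append, PySem.List.insertBy, h a (by simp)]
      simp [ih (fun a ha => h a (by simp [ha]))]

lemma insertBy_front {α : Type} (before : α → α → Bool) (x : α)
    (bs : List α) (h : ∀ a ∈ bs, before x a = true) :
    PySem.List.insertBy before x bs = x :: bs := by
  cases bs with
  | nil => rfl
  | cons b bs => simp [PySem.List.insertBy, h b (by simp)]

-- the bucket flattening
def bucketsOf {α : Type} (key : α → Int) (ks : List Int) (xs : List α) : List α :=
  ks.flatMap (fun c => xs.filter (fun a => key a == c))

lemma bucketsOf_append_singleton_not_mem {α : Type} (key : α → Int) (ks : List Int)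
    (xs : List α) (x : α) (hx : key x ∉ ks) :
    bucketsOf key ks (xs ++ [x]) = bucketsOf key ks xs := by
  unfold bucketsOf
  apply List.flatMap_congr
  intro c hc
  have : (key x == c) = false := by
    simp only [beq_eq_false_iff_ne, ne_eq]
    exact fun h => hx (h ▸ hc)
  simp [List.filter_append, this]

lemma insertBy_bucketsOf {α : Type} (key : α → Int) (x : α) (ks : List Int)
    (hks : ks.Pairwise (· < ·)) (hx : key x ∈ ks) (xs : List α) :
    PySem.List.insertBy (fun a b => decide (key a < key b)) x (bucketsOf key ks xs)
      = bucketsOf key ks (xs ++ [x]) := by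
  induction ks with
  | nil => cases hx
  | cons c ks ih =>
      have hlt : ∀ c' ∈ ks, c < c' := (List.pairwise_cons.mp hks).1
      by_cases hxc : key x = c
      · -- insert at the end of bucket c, in front of all later buckets
        have h1 : ∀ a ∈ xs.filter (fun a => key a == c), (decide (key x < key a)) = false := by
          intro a ha
          have : key a = c := by simpa using (List.mem_filter.mp ha).2
          simp [this, hxc]
        have h2 : ∀ a ∈ bucketsOf key ks xs, (decide (key x < key a)) = true := by
          intro a ha
          obtain ⟨c', hc', ha'⟩ := List.mem_flatMap.mp ha
          have : key a = c' := by simpa using (List.mem_filter.mp ha').2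
          simp [this, hxc]
          exact hlt c' hc'
        have hnot : key x ∉ ks := by
          intro h; exact absurd (hlt _ h) (by simp [hxc])
        rw [show bucketsOf key (c :: ks) xs
              = xs.filter (fun a => key a == c) ++ bucketsOf key ks xs from rfl,
            insertBy_append_of_not_before _ _ _ _ h1, insertBy_front _ _ _ h2]
        rw [show bucketsOf key (c :: ks) (xs ++ [x])
              = (xs ++ [x]).filter (fun a => key a == c) ++ bucketsOf key ks (xs ++ [x]) from rfl]
        rw [bucketsOf_append_singleton_not_mem key ks xs x hnot]
        simp [List.filter_append, hxc]
      · -- key x lands in a later bucket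
        have hxks : key x ∈ ks := by
          rcases List.mem_cons.mp hx with h | h
          · exact absurd h hxc
          · exact h
        have hclt : c < key x := hlt _ hxks
        have h1 : ∀ a ∈ xs.filter (fun a => key a == c), (decide (key x < key a)) = false := by
          intro a ha
          have : key a = c := by simpa using (List.mem_filter.mp ha).2
          simp [this]; omega
        rw [show bucketsOf key (c :: ks) xs
              = xs.filter (fun a => key a == c) ++ bucketsOf key ks xs from rfl,
            insertBy_append_of_not_before _ _ _ _ h1,
            ih (List.pairwise_cons.mp hks).2 hxks]
        have hfx : ((xs ++ [x]).filter (fun a => key a == c)) = xs.filter (fun a => key a == c) := by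
          simp [List.filter_append, hxc]
        rw [show bucketsOf key (c :: ks) (xs ++ [x])
              = (xs ++ [x]).filter (fun a => key a == c) ++ bucketsOf key ks (xs ++ [x]) from rfl,
            hfx]

-- stable sort = ascending-key bucket flattening
lemma sorted_eq_bucketsOf {α : Type} (key : α → Int) (xs : List α) (ks : List Int)
    (hks : ks.Pairwise (· < ·)) (hmem : ∀ a ∈ xs, key a ∈ ks) :
    PySem.List.sorted xs key false = bucketsOf key ks xs := by
  induction xs using List.reverseRecOn with
  | nil => simp [PySem.List.sorted, bucketsOf]
  | append_singleton xs x ih =>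
      rw [PySem.List.sorted_eq_foldl_insertBy, List.foldl_append, List.foldl_cons, List.foldl_nil,
          ← PySem.List.sorted_eq_foldl_insertBy,
          ih (fun a ha => hmem a (by simp [ha])),
          insertBy_bucketsOf key x ks hks (hmem x (by simp)) xs]

-- sorting by Nat length = sorting by the Int-cast length
lemma sorted_len_cast {α : Type} (xs : List (List α)) :
    PySem.List.sorted xs (fun ws => ws.length) false
      = PySem.List.sorted xs (fun ws => (ws.length : Int)) false := by
  rw [PySem.List.sorted_eq_foldl_insertBy, PySem.List.sorted_eq_foldl_insertBy]
  congr 1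
  funext acc a
  congr 1
  funext p q
  simp

-- ===== VERDICT (by name: the statement is the Claim_ definition above) =====
theorem func_10_spec : Claim_equal_func_10 := by
  intro x n _ hpre
  unfold Spec_func_10 func_10 func_10_alt
  by_cases hn : n ≤ 0
  · rw [PySem.List.pyRange_of_pos 0 n (by norm_num)]
    simp only [show ¬ (0:Int) < n by omega, if_false, List.range_zero,
      List.map_nil, List.foldl_nil]
    simp [PySem.Dict.keys_empty, PySem.List.sorted]
  replace hn : 0 < n := by omega
  -- shared names
  set g : Int → List String := fun i => PySem.Str.split₀ (PySem.List.pyGetD x i "") with hg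
  set R : List Int := PySem.List.pyRange 0 n with hR
  set L : List (List String) := R.map g with hL
  set key : List String → Int := fun ws => (ws.length : Int) with hkey
  set s2 : List (List String) := PySem.List.sorted L (fun ws => ws.length) false with hs2
  -- ===== the A side =====
  have hA1 : R.foldl (fun acc i => acc ++ [PySem.Str.split₀ (PySem.List.pyGetD x i "")]) []
      = L := by
    rw [PySem.List.foldl_append_singleton_eq_map g R []]; simp [hL]
  have hlen2 : (s2.length : Int) = n := by
    rw [hs2, PySem.List.length_sorted, hL, List.length_map, hR]
    simp [pysem]
    omega
  have hA : R.foldl (fun acc i => acc ++ [PySem.Str.join " " (PySem.List.pyGetD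
        (PySem.List.sorted (R.foldl (fun acc i => acc ++ [PySem.Str.split₀ (PySem.List.pyGetD x i "")]) [])
          (fun ws => ws.length) false) i [])]) []
      = s2.map (PySem.Str.join " ") := by
    rw [hA1, ← hs2, PySem.List.foldl_append_singleton_eq_map, List.nil_append]
    have : List.map (fun j => PySem.List.pyGetD s2 j []) R = s2 := by
      rw [hR, ← hlen2]
      exact_mod_cast PySem.List.map_pyGetD_pyRange_zero s2 []
    rw [show (fun i => PySem.Str.join " " (PySem.List.pyGetD s2 i []))
          = (PySem.Str.join " ") ∘ (fun j => PySem.List.pyGetD s2 j []) from rfl,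
        ← List.map_map, this]
  rw [hA]
  -- ===== the B side =====
  set pairs : List (Int × String) := L.map (fun ws => (key ws, PySem.Str.join " " ws)) with hpairs
  have hB1 : R.foldl
      (fun d i =>
        d.modify (((PySem.Str.split₀ (PySem.List.pyGetD x i "")).length : Int)) []
          (fun l => l ++ [PySem.Str.join " " (PySem.Str.split₀ (PySem.List.pyGetD x i ""))]))
      PySem.Dict.empty
      = pairs.foldl (fun d p => d.modify p.1 [] (fun l => l ++ [p.2])) PySem.Dict.empty := by
    rw [hpairs, List.foldl_map, hL, List.foldl_map]
  set d : PySem.Dict Int (List String) :=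
    pairs.foldl (fun d p => d.modify p.1 [] (fun l => l ++ [p.2])) PySem.Dict.empty with hd
  have hkeys : d.keys = PySem.Set.ofList (L.map key) := by
    rw [hd, PySem.Dict.keys_foldl_modify_key pairs Prod.fst [] (fun _ p v => v ++ [p.2]),
        PySem.Dict.keys_empty, PySem.Set.update_eq_append_filter, hpairs, List.map_map]
    simp [Function.comp_def]
  set ks : List Int := PySem.List.sorted (PySem.Set.ofList (L.map key)) (fun c => c) false with hks
  have hgetD : ∀ c, d.getD c []
      = (L.filter (fun ws => key ws == c)).map (PySem.Str.join " ") := by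
    intro c
    rw [hd, PySem.Dict.getD_foldl_modify_append pairs PySem.Dict.empty c,
        PySem.Dict.getD_empty, List.nil_append, hpairs, List.filter_map, List.map_map]
    rfl
  have hB : (PySem.List.sorted d.keys (fun c => c) false).foldl
        (fun out c => out ++ d.getD c []) []
      = (bucketsOf key ks L).map (PySem.Str.join " ") := by
    rw [hkeys, ← hks, PySem.List.foldl_append_eq_flatMap (fun c => d.getD c []) ks [],
        List.nil_append]
    rw [show (fun c => d.getD c []) = fun c =>
          (L.filter (fun ws => key ws == c)).map (PySem.Str.join " ") from funext hgetD]
    rw [bucketsOf, List.map_flatMap]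
  rw [hB1, hB]
  -- ===== the two sides meet =====
  congr 1
  rw [hs2, sorted_len_cast, ← hkey]
  refine sorted_eq_bucketsOf key L ks ?_ ?_
  · rw [hks]; exact PySem.List.sorted_ofList_pairwise_lt (L.map key)
  · intro a ha
    rw [hks, PySem.List.mem_sorted, PySem.Set.mem_ofList]
    exact List.mem_map_of_mem ha
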